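-- pv_equiv track=rewrite | github.com/Gumball2415/240p-test-mini | gameboy/tools/paginate_help.py | rgbasm_escape_bytes
-- ===== SOURCE A (Python) =====
-- def rgbasm_escape_bytes(blo):
--     """Encode an iterable of ints in 0-255, mostly ASCII, for rgbasm db statement"""
--     runs = []
--     for c in blo:
--         if 32 <= c <= 126 and c != 34:
--             if runs and isinstance(runs[-1], bytearray):
--                 runs[-1].append(c)
--             else:
--                 runs.append(bytearray([c]))
--         else:
--             runs.append(c)
--     runs = ['"%s"' % r.decode('ascii')
--             if isinstance(r, bytearray)
--             else '%d' % r
--             for r in runs]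
--     return ','.join(runs)
-- ===== SOURCE B (Python) =====
-- def rgbasm_escape_bytes(blo):
--     """Encode an iterable of ints in 0-255, mostly ASCII, for rgbasm db statement"""
--     def printable(c):
--         return 32 <= c <= 126 and c != 34
--     b = list(blo)
--     n = len(b)
--     tokens = []
--     i = 0
--     while i < n:
--         k = printable(b[i])
--         j = i + 1
--         while j < n and printable(b[j]) == k:
--             j += 1
--         if k:
--             tokens.append('"%s"' % ''.join(chr(c) for c in b[i:j]))
--         else:
--             tokens.extend('%d' % c for c in b[i:j])
--         i = j
--     return ','.join(tokens)
-- ===== Notes on version B (the rewrite author's own statement) =====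
-- stated objective: idiomatic
-- what changed: Replaced A's running builder that appends to a mutable last-bytearray run with a two-pointer span scan that finds each maximal same-printability group and emits its token(s) at once.
import Mathlib
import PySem

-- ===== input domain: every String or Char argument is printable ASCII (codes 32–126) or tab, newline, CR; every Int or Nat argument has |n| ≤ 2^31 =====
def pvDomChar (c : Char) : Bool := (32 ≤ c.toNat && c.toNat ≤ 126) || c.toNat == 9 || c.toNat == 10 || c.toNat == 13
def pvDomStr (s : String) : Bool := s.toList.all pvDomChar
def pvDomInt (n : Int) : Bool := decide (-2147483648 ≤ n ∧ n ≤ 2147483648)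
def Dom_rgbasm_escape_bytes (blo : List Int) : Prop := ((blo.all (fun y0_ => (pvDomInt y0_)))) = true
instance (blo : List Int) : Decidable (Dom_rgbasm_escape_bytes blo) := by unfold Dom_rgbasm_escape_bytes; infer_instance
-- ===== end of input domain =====

-- B replaces A's running append-to-last-bytearray run builder by a two-pointer span scan
-- that emits each maximal group's tokens at once (idiomatic; same O(n) cost).

-- ===== PORT A =====
-- `32 <= c <= 126 and c != 34`
def pvOk (c : Int) : Bool := (32 ≤ c && c ≤ 126) && c != 34

-- a run is either a bytearray (list of its byte values) or a single int
-- one step of A's `for c in blo:` loop over the accumulated `runs`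
def pvStepA (runs : List (List Int ⊕ Int)) (c : Int) : List (List Int ⊕ Int) :=
  if pvOk c then
    match runs.getLast? with
    | some (.inl g) => runs.dropLast ++ [.inl (g ++ [c])]   -- runs[-1].append(c)
    | _ => runs ++ [.inl [c]]                               -- runs.append(bytearray([c]))
  else runs ++ [.inr c]                                      -- runs.append(c)

-- '"%s"' % r.decode('ascii')  (exact: run bytes are 32..126, ≠ 34)
def pvQuote (g : List Int) : String :=
  "\"" ++ String.ofList (g.map (fun c => Char.ofNat c.toNat)) ++ "\""

-- the list comprehension over runs
def pvTokA (r : List Int ⊕ Int) : String :=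
  match r with
  | .inl g => pvQuote g
  | .inr c => PySem.Int.toStr c

def rgbasm_escape_bytes (blo : List Int) : String :=
  PySem.Str.join "," ((blo.foldl pvStepA []).map pvTokA)

-- ===== PORT B =====
-- B's outer while loop: take the maximal span sharing the head's printability,
-- emit its token(s), continue on the remainder.
def pvGoB (l : List Int) : List String :=
  match l with
  | [] => []
  | c :: rest =>
      let k := pvOk c
      let g := c :: rest.takeWhile (fun d => pvOk d == k)
      let rest' := rest.dropWhile (fun d => pvOk d == k)
      (if k then [pvQuote g] else g.map PySem.Int.toStr) ++ pvGoB rest'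
termination_by l.length
decreasing_by
  simp only [List.length_cons]
  exact Nat.lt_succ_of_le (List.length_dropWhile_le _ _)

def rgbasm_escape_bytes_alt (blo : List Int) : String :=
  PySem.Str.join "," (pvGoB blo)

-- ===== PRECONDITION & SPEC =====
def Spec_rgbasm_escape_bytes (blo : List Int) (out : String) : Prop := out = rgbasm_escape_bytes_alt blo
instance (blo : List Int) (out : String) : Decidable (Spec_rgbasm_escape_bytes blo out) := by unfold Spec_rgbasm_escape_bytes; infer_instance

-- ===== CLAIM (what is proved, stated in full; the proofs are below) =====
def Claim_equal_rgbasm_escape_bytes : Prop := ∀ (blo : List Int), Dom_rgbasm_escape_bytes blo → Spec_rgbasm_escape_bytes blo (rgbasm_escape_bytes blo)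

-- ===== LEMMAS AND PROOFS =====

-- canonical grouped form of A's run list
def pvRuns (l : List Int) : List (List Int ⊕ Int) :=
  match l with
  | [] => []
  | c :: rest =>
      if pvOk c then
        .inl (c :: rest.takeWhile pvOk) :: pvRuns (rest.dropWhile pvOk)
      else
        .inr c :: pvRuns rest
termination_by l.length
decreasing_by
  · simp only [List.length_cons]
    exact Nat.lt_succ_of_le (List.length_dropWhile_le _ _)
  · simp

-- `runs` does not end in an open bytearray
def pvClosed (runs : List (List Int ⊕ Int)) : Prop :=
  ∀ g, runs.getLast? ≠ some (.inl g)

theorem pvClosed_nil : pvClosed [] := by intro g h; simp at h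

theorem pvClosed_append_inr (runs : List (List Int ⊕ Int)) (c : Int) :
    pvClosed (runs ++ [.inr c]) := by
  intro g h; simp [List.getLast?_append] at h

theorem pvGetLast?_append_inl (runs : List (List Int ⊕ Int)) (g : List Int) :
    (runs ++ [Sum.inl g]).getLast? = some (.inl g) := by
  simp [List.getLast?_append]

theorem pvDropLast_append_inl (runs : List (List Int ⊕ Int)) (g : List Int) :
    (runs ++ [Sum.inl g]).dropLast = runs := by
  simp

-- mutual invariant for A's fold, by strong induction on the list length
theorem pvFoldA_char (n : Nat) :
    ∀ (l : List Int), l.length ≤ n →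
      (∀ runs, pvClosed runs → l.foldl pvStepA runs = runs ++ pvRuns l) ∧
      (∀ runs g, pvClosed runs →
        l.foldl pvStepA (runs ++ [.inl g]) =
          runs ++ [.inl (g ++ l.takeWhile pvOk)] ++ pvRuns (l.dropWhile pvOk)) := by
  induction n with
  | zero =>
      intro l hl
      have : l = [] := List.length_eq_zero_iff.mp (Nat.le_zero.mp hl)
      subst this
      constructor
      · intro runs _; simp [pvRuns]
      · intro runs g _; simp [pvRuns]
  | succ n ih =>
      intro l hl
      match l with
      | [] =>
          constructor
          · intro runs _; simp [pvRuns]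
          · intro runs g _; simp [pvRuns]
      | c :: rest =>
          have hrest : rest.length ≤ n := Nat.lt_succ_iff.mp (by simpa using hl)
          constructor
          · intro runs hcl
            by_cases hc : pvOk c
            · have hstep : pvStepA runs c = runs ++ [.inl [c]] := by
                unfold pvStepA
                rw [if_pos hc]
                cases hlast : runs.getLast? with
                | none => simp
                | some r =>
                    cases r with
                    | inl g => exact absurd hlast (hcl g)
                    | inr m => simp
              have h2 := ((ih rest hrest).2) runs [c] hcl
              simp only [List.foldl_cons, hstep, h2]
              rw [pvRuns]
              rw [if_pos hc]
              simp
            · have hstep : pvStepA runs c = runs ++ [.inr c] := by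
                unfold pvStepA; rw [if_neg hc]
              have h1 := ((ih rest hrest).1) (runs ++ [.inr c])
                (pvClosed_append_inr runs c)
              simp only [List.foldl_cons, hstep, h1]
              rw [pvRuns]
              rw [if_neg hc]
              simp
          · intro runs g hcl
            by_cases hc : pvOk c
            · have hstep : pvStepA (runs ++ [.inl g]) c = runs ++ [.inl (g ++ [c])] := by
                unfold pvStepA
                rw [if_pos hc, pvGetLast?_append_inl, pvDropLast_append_inl]
              have h2 := ((ih rest hrest).2) runs (g ++ [c]) hcl
              simp only [List.foldl_cons, hstep, h2]
              rw [List.takeWhile_cons_of_pos hc, List.dropWhile_cons_of_pos hc]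
              simp
            · have hstep : pvStepA (runs ++ [.inl g]) c = (runs ++ [.inl g]) ++ [.inr c] := by
                unfold pvStepA; rw [if_neg hc]
              have hcl' : pvClosed ((runs ++ [.inl g]) ++ [.inr c]) :=
                pvClosed_append_inr _ c
              have h1 := ((ih rest hrest).1) _ hcl'
              simp only [List.foldl_cons, hstep, h1]
              rw [List.takeWhile_cons_of_neg hc, List.dropWhile_cons_of_neg hc]
              rw [pvRuns]
              rw [if_neg hc]
              simp

theorem pvFoldA_eq_runs (l : List Int) : l.foldl pvStepA [] = pvRuns l := by
  have := ((pvFoldA_char l.length l le_rfl).1) [] pvClosed_nil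
  simpa using this

-- a block of non-printable elements contributes one decimal token each
theorem pvRuns_bad_block (tw : List Int) :
    ∀ rest, (∀ x ∈ tw, pvOk x = false) →
      (pvRuns (tw ++ rest)).map pvTokA = tw.map PySem.Int.toStr ++ (pvRuns rest).map pvTokA := by
  induction tw with
  | nil => intro rest _; simp
  | cons t ts ih =>
      intro rest h
      have ht : pvOk t = false := h t (by simp)
      have hts : ∀ x ∈ ts, pvOk x = false := fun x hx => h x (by simp [hx])
      rw [List.cons_append, pvRuns]
      rw [if_neg (by simp [ht])]
      simp [pvTokA, ih rest hts]

theorem pvTakeWhile_bad (l : List Int) :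
    ∀ x ∈ l.takeWhile (fun d => pvOk d == false), pvOk x = false := by
  intro x hx
  have := List.mem_takeWhile_imp hx
  simpa using this

-- main token-list equality
theorem pvTokens_eq (n : Nat) : ∀ (l : List Int), l.length ≤ n →
    (pvRuns l).map pvTokA = pvGoB l := by
  induction n with
  | zero =>
      intro l hl
      have : l = [] := List.length_eq_zero_iff.mp (Nat.le_zero.mp hl)
      subst this; simp [pvRuns, pvGoB]
  | succ n ih =>
      intro l hl
      match l with
      | [] => simp [pvRuns, pvGoB]
      | c :: rest =>
          have hrest : rest.length ≤ n := Nat.lt_succ_iff.mp (by simpa using hl)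
          by_cases hc : pvOk c
          · rw [pvRuns]
            rw [if_pos hc, pvGoB]
            simp only [hc, if_pos]
            have hpred : (fun d : Int => pvOk d == true) = (fun d => pvOk d) := by
              funext d; simp
            rw [hpred]
            have := ih (rest.dropWhile pvOk)
              (le_trans (List.length_dropWhile_le _ _) hrest)
            simp [pvTokA, this]
          · have hc' : pvOk c = false := by simpa using hc
            rw [pvRuns]
            rw [if_neg hc, pvGoB]
            simp only [hc', Bool.false_eq_true, if_false]
            set tw := rest.takeWhile (fun d => pvOk d == false) with htw
            set rest' := rest.dropWhile (fun d => pvOk d == false) with hrest'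
            have hsplit : rest = tw ++ rest' := (List.takeWhile_append_dropWhile).symm
            have hbad := pvTakeWhile_bad rest
            rw [hsplit]
            simp only [List.map_cons]
            rw [pvRuns_bad_block tw rest' (by simpa [htw] using hbad)]
            have hlen : rest'.length ≤ n :=
              le_trans (List.length_dropWhile_le _ _) hrest
            rw [ih rest' hlen]
            simp [pvTokA]

-- ===== VERDICT (by name: the statement is the Claim_ definition above) =====
theorem rgbasm_escape_bytes_spec : Claim_equal_rgbasm_escape_bytes := by
  intro blo _
  unfold Spec_rgbasm_escape_bytes rgbasm_escape_bytes rgbasm_escape_bytes_alt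
  rw [pvFoldA_eq_runs, pvTokens_eq blo.length blo le_rfl]
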